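-- pv_equiv track=rewrite | github.com/verba-neo/multi-it-ai-2 | p121683-외톨이알파벳/김가현.py | solution
-- ===== SOURCE A (Python) =====
-- def solution(input_string):
--     word = list(input_string)
--     sol = []    # 외톨이 알파벳
--     for i in range(0, len(input_string)-1):
--         if word[i] == word[i+1]:
--             pass
--         else:
--             for j in range(i+1, len(input_string)):
--                 if word[i] != word[j]:
--                     pass
--                 else:
--                     sol.append(word[i])
--     if len(sol) == 0:
--         answer = 'N'
--         return answer
--     else:
--         ans = list(sorted(set(sol)))
--         answer = ''.join(ans)
--         return answer
-- ===== SOURCE B (Python) =====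
-- def solution(input_string):
--     counts = {}
--     prev = None
--     for ch in input_string:
--         if ch != prev:
--             counts[ch] = counts.get(ch, 0) + 1
--             prev = ch
--     multi = sorted(c for c, n in counts.items() if n >= 2)
--     return ''.join(multi) if multi else 'N'
-- ===== Notes on version B (the rewrite author's own statement) =====
-- stated objective: faster
-- what changed: Replaced the quadratic nested index scan (for each run end, rescan the whole suffix for repeats) by a single pass that counts each character's runs in a dict, then outputs the sorted characters with at least two runs.
import Mathlib
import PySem

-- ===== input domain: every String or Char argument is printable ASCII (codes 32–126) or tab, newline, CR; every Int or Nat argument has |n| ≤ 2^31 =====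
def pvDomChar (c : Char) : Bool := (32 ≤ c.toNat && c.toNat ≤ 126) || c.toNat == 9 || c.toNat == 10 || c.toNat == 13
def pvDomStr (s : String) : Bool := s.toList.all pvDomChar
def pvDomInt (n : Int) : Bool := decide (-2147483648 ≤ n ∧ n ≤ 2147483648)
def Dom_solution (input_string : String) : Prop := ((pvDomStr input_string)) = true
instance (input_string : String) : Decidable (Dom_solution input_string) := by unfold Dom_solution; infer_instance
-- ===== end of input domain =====

-- B replaces A's quadratic nested index scan by a single run-counting pass over the string.

-- ===== PORT A =====
-- A: for each i with word[i] ≠ word[i+1], scan j = i+1 .. n-1 appending word[i] on every match; then sorted(set(sol)).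
def solution (input_string : String) : String :=
  let word : List Char := input_string.toList
  let n : Int := (PySem.Str.len input_string : Int)
  let sol : List Char :=
    (PySem.List.pyRange 0 (n - 1) 1).foldl (fun sol i =>
      if PySem.List.pyGetD word i ' ' = PySem.List.pyGetD word (i + 1) ' ' then sol
      else
        (PySem.List.pyRange (i + 1) n 1).foldl (fun sol j =>
          if PySem.List.pyGetD word i ' ' ≠ PySem.List.pyGetD word j ' ' then sol
          else sol ++ [PySem.List.pyGetD word i ' ']) sol) []
  if sol.length = 0 then "N"
  else
    let ans := PySem.List.sorted (PySem.Set.ofList sol) (fun x => x) false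
    String.ofList (PySem.Chars.join [] (ans.map (fun c => [c])))

-- ===== PORT B =====
-- B: one pass with (counts, prev); a char starts a new run when it differs from prev.
def solution_alt (input_string : String) : String :=
  let st := input_string.toList.foldl
    (fun (st : PySem.Dict Char Int × Option Char) ch =>
      if st.2 ≠ some ch then (st.1.insert ch (st.1.getD ch 0 + 1), some ch) else st)
    (PySem.Dict.empty, none)
  let counts := st.1
  let multi := PySem.List.sorted ((counts.items.filter (fun p => 2 ≤ p.2)).map Prod.fst)
      (fun x => x) false
  if multi ≠ [] then String.ofList (PySem.Chars.join [] (multi.map (fun c => [c]))) else "N"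

-- ===== PRECONDITION & SPEC =====
def Spec_solution (input_string : String) (out : String) : Prop := out = solution_alt input_string
instance (input_string : String) (out : String) : Decidable (Spec_solution input_string out) := by unfold Spec_solution; infer_instance

-- ===== CLAIM (what is proved, stated in full; the proofs are below) =====
def Claim_equal_solution : Prop := ∀ (input_string : String), Dom_solution input_string → Spec_solution input_string (solution input_string)

-- ===== LEMMAS AND PROOFS =====

def runsAux (p : Option Char) : List Char → List Char
  | [] => []
  | x :: t => if some x = p then runsAux p t else x :: runsAux (some x) t

def runsF (l : List Char) : List Char := runsAux none l

theorem runsF_cons2 (a b : Char) (t : List Char) :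
    runsF (a :: b :: t) = if a = b then runsF (b :: t) else a :: runsF (b :: t) := by
  by_cases h : a = b
  · subst h
    simp [runsF, runsAux]
  · simp [runsF, runsAux, h, Ne.symm h]

theorem mem_runsF (c : Char) (l : List Char) : c ∈ runsF l ↔ c ∈ l := by
  induction l with
  | nil => simp [runsF, runsAux]
  | cons a t ih =>
    cases t with
    | nil => simp [runsF, runsAux]
    | cons b t' =>
      rw [runsF_cons2]
      by_cases h : a = b
      · subst h; simp [ih, List.mem_cons]
      · simp [h, List.mem_cons, ih]

def Q (l : List Char) (c : Char) : Prop :=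
  ∃ k : Nat, k + 1 < l.length ∧ l.getD k ' ' = c ∧ l.getD (k + 1) ' ' ≠ c ∧ c ∈ l.drop (k + 1)

theorem Q_cons (a : Char) (l : List Char) (c : Char) :
    Q (a :: l) c ↔ (a = c ∧ 0 < l.length ∧ l.getD 0 ' ' ≠ c ∧ c ∈ l) ∨ Q l c := by
  constructor
  · rintro ⟨k, hk, h1, h2, h3⟩
    cases k with
    | zero =>
      left
      simp only [List.getD_cons_zero, List.getD_cons_succ, List.length_cons, List.drop_succ_cons,
        List.drop_zero] at h1 h2 h3 hk
      exact ⟨h1, by omega, h2, h3⟩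
    | succ k' =>
      right
      exact ⟨k', by simpa using hk, by simpa using h1, by simpa using h2, by simpa using h3⟩
  · rintro (⟨h1, h2, h3, h4⟩ | ⟨k, hk, h1, h2, h3⟩)
    · exact ⟨0, by simpa using h2, by simpa using h1, by simpa using h3, by simpa using h4⟩
    · exact ⟨k + 1, by simpa using hk, by simpa using h1, by simpa using h2, by simpa using h3⟩

theorem Q_iff_two_runs (l : List Char) (c : Char) : Q l c ↔ 2 ≤ (runsF l).count c := by
  induction l with
  | nil => simp [Q, runsF, runsAux]
  | cons a t ih =>
    cases t with
    | nil =>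
      simp only [runsF, runsAux, if_neg (by simp : ¬(some a = none))]
      constructor
      · rintro ⟨k, hk, -⟩; simp at hk
      · intro h
        have := List.count_le_length (l := [a]) (a := c)
        simp at this; omega
    | cons b t' =>
      rw [Q_cons, runsF_cons2]
      have hmem := mem_runsF c (b :: t')
      by_cases hab : a = b
      · subst hab
        simp only [List.getD_cons_zero]
        constructor
        · rintro (⟨rfl, -, hne, -⟩ | h)
          · exact absurd rfl hne
          · exact ih.mp h
        · intro h; exact Or.inr (ih.mpr h)
      · rw [if_neg hab]
        by_cases hca : c = a
        · have hcc : (a :: runsF (b :: t')).count c = (runsF (b :: t')).count c + 1 := by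
            simp [hca]
          rw [hcc]
          constructor
          · rintro (⟨ha, -, -, hm⟩ | hq)
            · have : 0 < (runsF (b :: t')).count c := List.count_pos_iff.mpr (hmem.mpr hm)
              omega
            · have := ih.mp hq; omega
          · intro h
            have hm : c ∈ b :: t' := hmem.mp (List.count_pos_iff.mp (by omega))
            refine Or.inl ⟨hca.symm, by simp, ?_, hm⟩
            simp only [List.getD_cons_zero]
            intro hbc
            exact hab (hca.symm.trans hbc.symm)
        · have hcc : (a :: runsF (b :: t')).count c = (runsF (b :: t')).count c := by
            simp [List.count_cons]
            exact fun h => hca h.symm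
          rw [hcc]
          constructor
          · rintro (⟨hac, -⟩ | hq)
            · exact absurd hac.symm hca
            · exact ih.mp hq
          · intro h; exact Or.inr (ih.mpr h)

theorem altFold (s : List Char) (d : PySem.Dict Char Int) (p : Option Char) :
    (s.foldl (fun (st : PySem.Dict Char Int × Option Char) ch =>
      if st.2 ≠ some ch then (st.1.insert ch (st.1.getD ch 0 + 1), some ch) else st)
      (d, p)).1 =
    (runsAux p s).foldl (fun d x => d.insert x (d.getD x 0 + 1)) d := by
  induction s generalizing d p with
  | nil => rfl
  | cons x t ih =>
    simp only [List.foldl_cons]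
    by_cases h : p = some x
    · rw [if_neg (not_not_intro h),
        show runsAux p (x :: t) = runsAux p t from by simp [runsAux, h]]
      exact ih d p
    · rw [if_pos h,
        show runsAux p (x :: t) = x :: runsAux (some x) t from by
          simp only [runsAux, if_neg (fun hh : some x = p => h hh.symm)]]
      simp only [List.foldl_cons]
      exact ih _ _

theorem altDict (s : List Char) :
    (s.foldl (fun (st : PySem.Dict Char Int × Option Char) ch =>
      if st.2 ≠ some ch then (st.1.insert ch (st.1.getD ch 0 + 1), some ch) else st)
      (PySem.Dict.empty, none)).1 = PySem.Dict.counter (runsF s) := by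
  rw [altFold]
  exact PySem.Dict.foldl_insert_getD_add_one_eq_counter (runsF s)

theorem mem_drop_iff (l : List Char) (d : Nat) (c : Char) :
    c ∈ l.drop d ↔ ∃ m : Nat, d ≤ m ∧ m < l.length ∧ l.getD m ' ' = c := by
  rw [List.mem_iff_getElem?]
  constructor
  · rintro ⟨i, hi⟩
    rw [List.getElem?_drop] at hi
    obtain ⟨hlt, heq⟩ := List.getElem?_eq_some_iff.mp hi
    exact ⟨d + i, by omega, hlt, by rw [List.getD_eq_getElem _ _ hlt]; exact heq⟩
  · rintro ⟨m, h1, h2, h3⟩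
    refine ⟨m - d, ?_⟩
    rw [List.getElem?_drop, show d + (m - d) = m from by omega,
      List.getElem?_eq_getElem h2, ← List.getD_eq_getElem l ' ' h2, h3]

theorem mem_solA (s : List Char) (c : Char) :
    c ∈ (PySem.List.pyRange 0 ((s.length : Int) - 1) 1).foldl (fun sol i =>
      if PySem.List.pyGetD s i ' ' = PySem.List.pyGetD s (i + 1) ' ' then sol
      else
        (PySem.List.pyRange (i + 1) (s.length : Int) 1).foldl (fun sol j =>
          if PySem.List.pyGetD s i ' ' ≠ PySem.List.pyGetD s j ' ' then sol
          else sol ++ [PySem.List.pyGetD s i ' ']) sol) [] ↔ Q s c := by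
  have hout :
      (PySem.List.pyRange 0 ((s.length : Int) - 1) 1).foldl (fun sol i =>
        if PySem.List.pyGetD s i ' ' = PySem.List.pyGetD s (i + 1) ' ' then sol
        else
          (PySem.List.pyRange (i + 1) (s.length : Int) 1).foldl (fun sol j =>
            if PySem.List.pyGetD s i ' ' ≠ PySem.List.pyGetD s j ' ' then sol
            else sol ++ [PySem.List.pyGetD s i ' ']) sol) [] =
      (PySem.List.pyRange 0 ((s.length : Int) - 1) 1).flatMap (fun i =>
        if PySem.List.pyGetD s i ' ' = PySem.List.pyGetD s (i + 1) ' ' then []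
        else ((PySem.List.pyRange (i + 1) (s.length : Int) 1).filter
            (fun j => PySem.List.pyGetD s i ' ' == PySem.List.pyGetD s j ' ')).map
          (fun _ => PySem.List.pyGetD s i ' ')) := by
    rw [PySem.List.foldl_congr_mem _ _
      (fun sol i => sol ++ (if PySem.List.pyGetD s i ' ' = PySem.List.pyGetD s (i + 1) ' ' then []
        else ((PySem.List.pyRange (i + 1) (s.length : Int) 1).filter
            (fun j => PySem.List.pyGetD s i ' ' == PySem.List.pyGetD s j ' ')).map
          (fun _ => PySem.List.pyGetD s i ' '))) _ ?_]
    · exact PySem.List.foldl_append_eq_flatMap _ _ _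
    · intro acc i _
      by_cases h : PySem.List.pyGetD s i ' ' = PySem.List.pyGetD s (i + 1) ' '
      · simp [h]
      · simp only [if_neg h]
        rw [PySem.List.foldl_congr_mem _ _
          (fun sol j => if (PySem.List.pyGetD s i ' ' == PySem.List.pyGetD s j ' ') then
            sol ++ [PySem.List.pyGetD s i ' '] else sol) _ ?_]
        · exact PySem.List.foldl_append_if _ _ _ _
        · intro acc' j _
          by_cases hj : PySem.List.pyGetD s i ' ' = PySem.List.pyGetD s j ' ' <;> simp [hj]
  rw [hout]
  simp only [List.mem_flatMap, PySem.List.mem_pyRange_one]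
  constructor
  · rintro ⟨i, ⟨hi0, hi1⟩, hc⟩
    split at hc
    · simp at hc
    · rename_i hne
      obtain ⟨j, hjmem, rfl⟩ := List.mem_map.mp hc
      obtain ⟨hjr, hjp⟩ := List.mem_filter.mp hjmem
      rw [PySem.List.mem_pyRange_one] at hjr
      lift i to ℕ using hi0
      have hj0 : (0:Int) ≤ j := by omega
      lift j to ℕ using hj0
      rw [PySem.List.pyGetD_natCast] at hne hjp ⊢
      rw [show (i:Int) + 1 = ((i+1 : ℕ) : Int) from by push_cast; ring] at hne hjr
      rw [PySem.List.pyGetD_natCast] at hne hjp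
      refine ⟨i, by omega, rfl, fun hgd => hne (by rw [hgd]), ?_⟩
      rw [mem_drop_iff]
      exact ⟨j, by omega, by omega, by simpa using (eq_of_beq hjp).symm⟩
  · rintro ⟨k, hk, hks, hkne, hmem⟩
    rw [mem_drop_iff] at hmem
    obtain ⟨m, hm1, hm2, hm3⟩ := hmem
    refine ⟨(k : Int), ⟨by omega, by omega⟩, ?_⟩
    rw [show (k:Int) + 1 = ((k+1 : ℕ) : Int) from by push_cast; ring,
      PySem.List.pyGetD_natCast, PySem.List.pyGetD_natCast]
    rw [if_neg (by rw [hks]; exact fun h => hkne h.symm)]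
    refine List.mem_map.mpr ⟨(m : Int), List.mem_filter.mpr ⟨?_, ?_⟩, hks⟩
    · rw [PySem.List.mem_pyRange_one]; omega
    · have hseq : s.getD k ' ' = s.getD m ' ' := by rw [hks, hm3]
      simp only [PySem.List.pyGetD_natCast, beq_iff_eq] at hseq ⊢
      simpa using hseq

theorem solution_spec_raw (s : String) : solution s = solution_alt s := by
  unfold solution solution_alt
  simp only [PySem.Str.len_eq, altDict, PySem.Dict.items_counter]
  set w := s.toList with hw
  set solL := (PySem.List.pyRange 0 ((w.length : Int) - 1) 1).foldl (fun sol i =>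
      if PySem.List.pyGetD w i ' ' = PySem.List.pyGetD w (i + 1) ' ' then sol
      else
        (PySem.List.pyRange (i + 1) (w.length : Int) 1).foldl (fun sol j =>
          if PySem.List.pyGetD w i ' ' ≠ PySem.List.pyGetD w j ' ' then sol
          else sol ++ [PySem.List.pyGetD w i ' ']) sol) [] with hsolL
  have hQ : ∀ c, c ∈ solL ↔ Q w c := fun c => by rw [hsolL]; exact mem_solA w c
  have hfm : (List.filter (fun p => decide (2 ≤ p.2))
      (List.map (fun k => (k, ((List.count k (runsF w)) : Int))) (PySem.Set.ofList (runsF w)))).map Prod.fst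
      = (PySem.Set.ofList (runsF w)).filter
          (fun k => decide (2 ≤ ((List.count k (runsF w)) : Int))) := by
    rw [List.filter_map, List.map_map]
    simp [Function.comp_def]
  have hmemB : ∀ c, (c ∈ (PySem.Set.ofList (runsF w)).filter
      (fun k => decide (2 ≤ ((List.count k (runsF w)) : Int))) ↔ 2 ≤ (runsF w).count c) := by
    intro c
    rw [List.mem_filter, PySem.Set.mem_ofList]
    constructor
    · rintro ⟨-, h⟩
      exact_mod_cast of_decide_eq_true h
    · intro h
      refine ⟨List.count_pos_iff.mp (by omega), by simp; exact_mod_cast h⟩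
  have hperm : (PySem.Set.ofList solL).Perm ((PySem.Set.ofList (runsF w)).filter
      (fun k => decide (2 ≤ ((List.count k (runsF w)) : Int)))) :=
    (List.perm_ext_iff_of_nodup (PySem.Set.nodup_ofList _)
      ((PySem.Set.nodup_ofList _).filter _)).mpr
      (fun c => by rw [PySem.Set.mem_ofList, hQ, Q_iff_two_runs, hmemB])
  rw [hfm, PySem.List.sorted_eq_sorted_of_perm _ _ _ (fun a b h => h) hperm]
  by_cases hnil : solL = []
  · have hfil : (PySem.Set.ofList (runsF w)).filter
        (fun k => decide (2 ≤ ((List.count k (runsF w)) : Int))) = [] := by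
      have := hperm
      rw [hnil] at this
      simpa using this.symm.eq_nil
    rw [if_pos (by rw [hnil]; rfl), hfil]
    simp [PySem.List.sorted_eq_nil_iff]
  · obtain ⟨c, hc⟩ := List.exists_mem_of_ne_nil _ hnil
    have hcf : c ∈ (PySem.Set.ofList (runsF w)).filter
        (fun k => decide (2 ≤ ((List.count k (runsF w)) : Int))) :=
      hperm.mem_iff.mp ((PySem.Set.mem_ofList _ _).mpr hc)
    rw [if_neg (by simpa using fun h => hnil (List.length_eq_zero_iff.mp h)),
      if_pos (by rw [Ne, PySem.List.sorted_eq_nil_iff]; exact List.ne_nil_of_mem hcf)]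

-- ===== VERDICT (by name: the statement is the Claim_ definition above) =====
theorem solution_spec : Claim_equal_solution := by
  intro s _
  unfold Spec_solution
  exact solution_spec_raw s
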